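-- pv_equiv track=rewrite | github.com/luizrennocosta/comp1ufrj | listas/lista1/submissions/123681761.lista1.py | questao7
-- ===== SOURCE A (Python) =====
-- def factorial(n):
--     produto = 1
--     if n == 0:
--         return 1
--     else:
--         while n>1:
--             produto*=n
--             n-=1
--     return produto
--
-- def curioso(num):
--     num_string = str(num)
--     numero_curioso = 0
--     for algarismo in num_string:
--         factorial_algarismo = factorial(int(algarismo))
--         numero_curioso += factorial_algarismo
--     return numero_curioso
--
-- def questao7(numero):
--     contagem = 0
--     soma = 0
--     while contagem < numero:
--         n_curioso = curioso(contagem)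
--         if n_curioso == contagem:
--             soma+=contagem
--         contagem +=1
--     return soma
-- ===== SOURCE B (Python) =====
-- def questao7(numero):
--     fact = (1, 1, 2, 6, 24, 120, 720, 5040, 40320, 362880)
--     dp = []  # dp[n] = sum of factorials of the decimal digits of n
--     total = 0
--     for n in range(numero):
--         dp.append(fact[n] if n < 10 else dp[n // 10] + fact[n % 10])
--         if dp[n] == n:
--             total += n
--     return total
-- ===== Notes on version B (the rewrite author's own statement) =====
-- stated objective: faster
-- what changed: A recomputes each number's digit-factorial sum from scratch (str(n), then a multiplication loop per digit); B keeps a dp list with dp[n] = dp[n // 10] + fact[n % 10] over a precomputed 10-entry factorial table, so each number costs O(1) amortized.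
import Mathlib
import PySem

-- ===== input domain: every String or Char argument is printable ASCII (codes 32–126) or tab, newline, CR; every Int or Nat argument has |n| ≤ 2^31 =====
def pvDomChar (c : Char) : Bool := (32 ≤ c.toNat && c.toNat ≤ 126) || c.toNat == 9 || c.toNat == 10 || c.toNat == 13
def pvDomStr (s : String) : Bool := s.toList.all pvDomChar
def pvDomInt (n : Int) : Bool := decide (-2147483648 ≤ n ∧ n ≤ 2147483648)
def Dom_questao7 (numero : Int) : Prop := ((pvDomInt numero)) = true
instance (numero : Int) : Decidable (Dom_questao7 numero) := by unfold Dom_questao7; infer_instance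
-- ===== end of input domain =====

-- B replaces A's per-number string conversion and per-digit factorial loops by a DP list
-- dp[n] = dp[n // 10] + fact[n % 10] with a precomputed factorial table (constant-factor faster).

-- ===== PORT A =====
-- factorial: 'while n > 1: produto *= n; n -= 1'
def pvFactLoop (produto : Int) (n : Int) : Int :=
  if h : 1 < n then pvFactLoop (produto * n) (n - 1) else produto
termination_by n.toNat
decreasing_by omega

def pvFactorial (n : Int) : Int :=
  if n == 0 then 1 else pvFactLoop 1 n

-- curioso: for each character of str(num), add factorial(int(char)).
-- int(algarismo) is ported as (ofChars? [c]).getD 0; the default is never used at A's call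
-- sites, where num ≥ 0 so every character of str(num) is a digit.
def pvCurioso (num : Int) : Int :=
  (PySem.Int.toChars num).foldl
    (fun acc c => acc + pvFactorial ((PySem.Int.ofChars? [c]).getD 0)) 0

-- questao7's while loop: state (contagem, soma)
def pvQ7Loop (numero contagem soma : Int) : Int :=
  if _h : contagem < numero then
    pvQ7Loop numero (contagem + 1)
      (if pvCurioso contagem == contagem then soma + contagem else soma)
  else soma
termination_by (numero - contagem).toNat
decreasing_by omega

def questao7 (numero : Int) : Int := pvQ7Loop numero 0 0

-- ===== PORT B =====
def pvFactTable : List Int := [1, 1, 2, 6, 24, 120, 720, 5040, 40320, 362880]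

-- one iteration of B's loop body; list indices are always in range here (fact has 10
-- entries, dp has n + 1 entries after the append), so pyGetD's default is never used
def pvStep (st : List Int × Int) (n : Int) : List Int × Int :=
  let dp := st.1 ++ [if n < 10 then PySem.List.pyGetD pvFactTable n 0
                     else PySem.List.pyGetD st.1 (PySem.Int.floordiv n 10) 0 +
                          PySem.List.pyGetD pvFactTable (PySem.Int.mod n 10) 0]
  (dp, if PySem.List.pyGetD dp n 0 == n then st.2 + n else st.2)

def questao7_alt (numero : Int) : Int :=
  ((PySem.List.pyRange 0 numero 1).foldl pvStep ([], 0)).2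

-- ===== PRECONDITION & SPEC =====
def Spec_questao7 (numero : Int) (out : Int) : Prop := out = questao7_alt numero
instance (numero : Int) (out : Int) : Decidable (Spec_questao7 numero out) := by unfold Spec_questao7; infer_instance

-- ===== CLAIM (what is proved, stated in full; the proofs are below) =====
def Claim_equal_questao7 : Prop := ∀ (numero : Int), Dom_questao7 numero → Spec_questao7 numero (questao7 numero)

-- ===== LEMMAS AND PROOFS =====

-- the decimal digit characters of n, most significant first (what str(n) produces for n ≥ 0)
def pvDigits (n : Nat) : List Char :=
  if _h : n < 10 then [Nat.digitChar n]
  else pvDigits (n / 10) ++ [Nat.digitChar (n % 10)]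
termination_by n
decreasing_by omega

-- the digit-factorial sum, arithmetically
def pvG (n : Nat) : Nat :=
  if _h : n < 10 then Nat.factorial n
  else pvG (n / 10) + Nat.factorial (n % 10)
termination_by n
decreasing_by omega

lemma pvToDigitsCore_eq (f : Nat) : ∀ (n : Nat) (acc : List Char), 0 < f → n < 10 ^ f →
    Nat.toDigitsCore 10 f n acc = pvDigits n ++ acc := by
  induction f with
  | zero => intro n acc h; omega
  | succ f ih =>
    intro n acc _ hlt
    by_cases h : n < 10
    · rw [pvDigits]
      simp [Nat.toDigitsCore, Nat.div_eq_of_lt h, Nat.mod_eq_of_lt h, h]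
    · have h10 : n / 10 ≠ 0 := by omega
      have hf : 0 < f := by
        by_contra hf0
        have : f = 0 := by omega
        subst this; simp at hlt; omega
      rw [pvDigits]
      simp only [Nat.toDigitsCore, h10, dif_neg h]
      rw [ih (n / 10) _ hf (by
        have : n < 10 * 10 ^ f := by rw [← pow_succ']; exact hlt
        omega)]
      simp

lemma pvToChars_eq (n : Nat) : PySem.Int.toChars (n : Int) = pvDigits n := by
  have hneg : ¬ ((n : Int) < 0) := by omega
  have hbound : n < 10 ^ (n + 1) := by
    have h1 : n < 2 ^ n := Nat.lt_two_pow_self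
    have h2 : (2 : Nat) ^ n ≤ 10 ^ n := Nat.pow_le_pow_left (by norm_num) n
    have h3 : (10 : Nat) ^ n ≤ 10 ^ (n + 1) := Nat.pow_le_pow_right (by norm_num) (by omega)
    omega
  simp only [PySem.Int.toChars, if_neg hneg, Int.toNat_natCast]
  rw [Nat.toDigits]
  simpa using pvToDigitsCore_eq (n + 1) n [] (by omega) hbound

lemma pvDigitVal (d : Nat) (hd : d < 10) :
    (PySem.Int.ofChars? [Nat.digitChar d]).getD 0 = (d : Int) := by
  interval_cases d <;> decide

lemma pvFactLoop_eq (k : Nat) : ∀ p : Int, pvFactLoop p (k : Int) = p * (Nat.factorial k : Int) := by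
  induction k with
  | zero => intro p; rw [pvFactLoop, dif_neg (by omega)]; simp [Nat.factorial]
  | succ k ih =>
    intro p
    by_cases hk : k = 0
    · subst hk; rw [pvFactLoop, dif_neg (by omega)]; simp [Nat.factorial]
    · rw [pvFactLoop, dif_pos (show (1 : Int) < ((k + 1 : Nat) : Int) by omega)]
      have h1 : ((k + 1 : Nat) : Int) - 1 = (k : Int) := by push_cast; ring
      rw [h1, ih]
      push_cast [Nat.factorial_succ]
      ring

lemma pvFactorial_eq (d : Nat) :
    pvFactorial (d : Int) = (Nat.factorial d : Int) := by
  by_cases hd : d = 0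
  · subst hd; rw [pvFactorial]; simp [Nat.factorial]
  · have hne : ((d : Int) == 0) = false := by
      simp only [beq_eq_false_iff_ne, ne_eq]
      exact_mod_cast hd
    rw [pvFactorial, hne]
    simp [pvFactLoop_eq d 1]

lemma pvFold_digits (n : Nat) : ∀ (a : Int),
    (pvDigits n).foldl (fun acc c => acc + pvFactorial ((PySem.Int.ofChars? [c]).getD 0)) a
      = a + (pvG n : Int) := by
  induction n using Nat.strong_induction_on with
  | _ n ih =>
    intro a
    by_cases h : n < 10
    · rw [pvDigits, dif_pos h, pvG, dif_pos h]
      simp [pvDigitVal n h, pvFactorial_eq n]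
    · rw [pvDigits, dif_neg h, pvG, dif_neg h, List.foldl_append,
        ih (n / 10) (by omega) a]
      simp only [List.foldl_cons, List.foldl_nil, pvDigitVal (n % 10) (by omega),
        pvFactorial_eq (n % 10)]
      push_cast
      ring

lemma pvCurioso_eq (n : Nat) : pvCurioso (n : Int) = (pvG n : Int) := by
  rw [pvCurioso, pvToChars_eq, pvFold_digits]
  ring

-- the common reference value: sum of the factorions among c, c+1, …, c+m-1
def pvSpecSum : Nat → Nat → Int
  | 0, _ => 0
  | m + 1, c => (if pvG c = c then (c : Int) else 0) + pvSpecSum m (c + 1)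

lemma pvLoopA_eq (m : Nat) : ∀ (numero : Int) (c : Nat) (s : Int),
    m = (numero - (c : Int)).toNat →
    pvQ7Loop numero (c : Int) s = s + pvSpecSum m c := by
  induction m with
  | zero =>
    intro numero c s hm
    rw [pvQ7Loop, dif_neg (by omega), pvSpecSum]
    ring
  | succ m ih =>
    intro numero c s hm
    have hc : (c : Int) < numero := by omega
    rw [pvQ7Loop, dif_pos hc]
    have : (c : Int) + 1 = ((c + 1 : Nat) : Int) := by push_cast; ring
    rw [this, ih numero (c + 1) _ (by omega), pvSpecSum]
    rw [pvCurioso_eq]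
    by_cases hg : pvG c = c
    · simp [hg]; ring
    · have : ((pvG c : Int) == (c : Int)) = false := by
        simp only [beq_eq_false_iff_ne, ne_eq]; exact_mod_cast hg
      simp [this, hg]

lemma pvFactTable_getD (d : Nat) (hd : d < 10) :
    pvFactTable.getD d 0 = (Nat.factorial d : Int) := by
  interval_cases d <;> decide

lemma pvRangeMap_getD (g : Nat → Int) (c i : Nat) (hi : i < c) :
    ((List.range c).map g).getD i 0 = g i := by
  rw [List.getD_eq_getElem?_getD]
  simp [hi]

lemma pvLoopB_eq (m : Nat) : ∀ (numero : Int) (c : Nat) (t : Int),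
    m = (numero - (c : Int)).toNat →
    ((PySem.List.pyRange (c : Int) numero 1).foldl pvStep
        ((List.range c).map (fun k => (pvG k : Int)), t)).2 = t + pvSpecSum m c := by
  induction m with
  | zero =>
    intro numero c t hm
    rw [PySem.List.pyRange_one_eq_nil (by omega), List.foldl_nil, pvSpecSum]
    ring
  | succ m ih =>
    intro numero c t hm
    have hc : (c : Int) < numero := by omega
    rw [PySem.List.pyRange_one_cons hc, List.foldl_cons]
    -- evaluate one step of the fold
    have hentry : (if (c : Int) < 10 then PySem.List.pyGetD pvFactTable (c : Int) 0
          else PySem.List.pyGetD ((List.range c).map (fun k => (pvG k : Int))) (PySem.Int.floordiv (c : Int) 10) 0 +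
               PySem.List.pyGetD pvFactTable (PySem.Int.mod (c : Int) 10) 0)
        = (pvG c : Int) := by
      by_cases h : c < 10
      · rw [if_pos (by exact_mod_cast h), PySem.List.pyGetD_natCast,
          pvFactTable_getD c h, pvG, dif_pos h]
      · have hdiv : PySem.Int.floordiv (c : Int) 10 = ((c / 10 : Nat) : Int) := by
          exact_mod_cast PySem.Int.floordiv_natCast c 10
        have hmod : PySem.Int.mod (c : Int) 10 = ((c % 10 : Nat) : Int) := by
          exact_mod_cast PySem.Int.mod_natCast c 10
        rw [if_neg (by exact_mod_cast h), hdiv, hmod, PySem.List.pyGetD_natCast,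
          PySem.List.pyGetD_natCast, pvRangeMap_getD _ c (c / 10) (by omega),
          pvFactTable_getD (c % 10) (by omega)]
        conv_rhs => rw [pvG, dif_neg h]
        push_cast
        ring
    have hdp : (List.range c).map (fun k => (pvG k : Int)) ++ [(pvG c : Int)]
        = (List.range (c + 1)).map (fun k => (pvG k : Int)) := by
      rw [List.range_succ, List.map_append]; rfl
    have hlast : PySem.List.pyGetD ((List.range (c + 1)).map (fun k => (pvG k : Int))) (c : Int) 0
        = (pvG c : Int) := by
      rw [PySem.List.pyGetD_natCast, pvRangeMap_getD _ (c + 1) c (by omega)]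
    have hstep : pvStep ((List.range c).map (fun k => (pvG k : Int)), t) (c : Int)
        = ((List.range (c + 1)).map (fun k => (pvG k : Int)),
           if pvG c = c then t + (c : Int) else t) := by
      simp only [pvStep, hentry, hdp, hlast]
      by_cases hg : pvG c = c
      · simp [hg]
      · have : ((pvG c : Int) == (c : Int)) = false := by
          simp only [beq_eq_false_iff_ne, ne_eq]; exact_mod_cast hg
        simp [this, hg]
    rw [hstep]
    have hcast : (c : Int) + 1 = ((c + 1 : Nat) : Int) := by push_cast; ring
    rw [hcast, ih numero (c + 1) _ (by omega), pvSpecSum]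
    by_cases hg : pvG c = c
    · simp [hg]; ring
    · simp [hg]

-- ===== VERDICT (by name: the statement is the Claim_ definition above) =====
theorem questao7_spec : Claim_equal_questao7 := by
  intro numero _
  unfold Spec_questao7 questao7 questao7_alt
  have h0 : ((0 : Nat) : Int) = (0 : Int) := rfl
  have hA := pvLoopA_eq (numero.toNat) numero 0 0 (by omega)
  have hB := pvLoopB_eq (numero.toNat) numero 0 0 (by omega)
  simp only [h0, List.range_zero, List.map_nil] at hA hB
  rw [hA, hB]
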